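-- pv_equiv track=rewrite | github.com/1S2022/LFP-1S-2022 | 04 Ejemplo de Análisis y Autómata/Práctica 1/main.py | juntar
-- ===== SOURCE A (Python) =====
-- def juntar(cont):
--     auxNoBlanks = ''
--     estado = 0
--     for c in cont:
--         if c == '\n' or c == '\t' or c == '(' or c == ')':
--             pass
--         else:
--             if estado == 0 and c != ' ':
--                 auxNoBlanks += c
--                 if c == '\"':
--                     estado = 1
--             elif estado == 1:
--                 auxNoBlanks += c
--                 if c == '\"':
--                     estado = 0
--
--     return auxNoBlanks
-- ===== SOURCE B (Python) =====
-- def juntar(cont):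
--     parts = cont.split('"')
--     out = []
--     for i, seg in enumerate(parts):
--         if i % 2 == 0:
--             out.append(''.join(c for c in seg if c not in '\n\t() '))
--         else:
--             out.append(''.join(c for c in seg if c not in '\n\t()'))
--     return '"'.join(out)
-- ===== Notes on version B (the rewrite author's own statement) =====
-- stated objective: idiomatic
-- what changed: Replaces the char-by-char state-machine scan (estado flag toggled on quotes) with split on the quote character, per-segment filtering by index parity (spaces kept only inside quoted segments), and rejoin.
import Mathlib
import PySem

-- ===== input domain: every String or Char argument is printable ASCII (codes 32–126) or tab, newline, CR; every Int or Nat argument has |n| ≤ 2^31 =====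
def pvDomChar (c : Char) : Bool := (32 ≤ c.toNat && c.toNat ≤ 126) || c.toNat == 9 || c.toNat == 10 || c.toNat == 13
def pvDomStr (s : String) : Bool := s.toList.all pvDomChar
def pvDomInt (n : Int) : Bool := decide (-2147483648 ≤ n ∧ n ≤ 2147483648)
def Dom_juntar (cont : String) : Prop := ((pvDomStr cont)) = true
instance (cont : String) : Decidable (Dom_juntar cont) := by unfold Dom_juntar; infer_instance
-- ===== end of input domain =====

-- B replaces A's char-by-char state machine by split-on-quote / filter segments by index parity / rejoin (objective: idiomatic; a timing run measured B faster by a constant factor).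

-- ===== PORT A =====
-- state: (auxNoBlanks as a char list, estado)
def juntarStep (st : List Char × Int) (c : Char) : List Char × Int :=
  if c = '\n' ∨ c = '\t' ∨ c = '(' ∨ c = ')' then st
  else if st.2 = 0 ∧ c ≠ ' ' then
    (st.1 ++ [c], if c = '"' then 1 else st.2)
  else if st.2 = 1 then
    (st.1 ++ [c], if c = '"' then 0 else st.2)
  else st

def juntar (cont : String) : String :=
  String.ofList (cont.toList.foldl juntarStep ([], 0)).1

-- ===== PORT B =====
-- filter of one segment: even index (outside quotes) also drops spaces
def juntarFilt (i : Int) (seg : List Char) : List Char :=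
  if PySem.Int.mod i 2 = 0 then seg.filter (fun c => !(['\n', '\t', '(', ')', ' '].contains c))
  else seg.filter (fun c => !(['\n', '\t', '(', ')'].contains c))

def juntar_alt (cont : String) : String :=
  String.ofList (PySem.Chars.join ['"']
    ((PySem.List.enumerate (PySem.Chars.splitOn cont.toList ['"'])).map
      (fun p => juntarFilt p.1 p.2)))

-- ===== PRECONDITION & SPEC =====
def Spec_juntar (cont : String) (out : String) : Prop := out = juntar_alt cont
instance (cont : String) (out : String) : Decidable (Spec_juntar cont out) := by unfold Spec_juntar; infer_instance

-- ===== CLAIM (what is proved, stated in full; the proofs are below) =====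
def Claim_equal_juntar : Prop := ∀ (cont : String), Dom_juntar cont → Spec_juntar cont (juntar cont)

-- ===== LEMMAS AND PROOFS =====

-- reference scanner: g inside l = what remains of l, starting inside (true) / outside (false) quotes
def gScan (inside : Bool) : List Char → List Char
  | [] => []
  | c :: t =>
    if c = '\n' ∨ c = '\t' ∨ c = '(' ∨ c = ')' then gScan inside t
    else if inside then
      if c = '"' then '"' :: gScan false t else c :: gScan true t
    else
      if c = ' ' then gScan false t
      else if c = '"' then '"' :: gScan true t else c :: gScan false t

-- A's fold computes gScan
theorem foldA_eq (l : List Char) : ∀ (acc : List Char) (e : Int), e = 0 ∨ e = 1 →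
    (l.foldl juntarStep (acc, e)).1 = acc ++ gScan (e == 1) l := by
  induction l with
  | nil => intro acc e _; simp [gScan]
  | cons c t ih =>
    intro acc e he
    by_cases hb : c = '\n' ∨ c = '\t' ∨ c = '(' ∨ c = ')'
    · rcases he with rfl | rfl
      · simp [List.foldl_cons, juntarStep, hb, gScan, ih acc 0 (Or.inl rfl)]
      · simp [List.foldl_cons, juntarStep, hb, gScan, ih acc 1 (Or.inr rfl)]
    · rcases he with rfl | rfl
      · by_cases hs : c = ' '
        · simp [List.foldl_cons, juntarStep, hb, hs, gScan, ih acc 0 (Or.inl rfl)]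
        · by_cases hq : c = '"'
          · simp [List.foldl_cons, juntarStep, hb, hs, hq, gScan,
              ih (acc ++ ['"']) 1 (Or.inr rfl)]
          · simp [List.foldl_cons, juntarStep, hb, hs, hq, gScan,
              ih (acc ++ [c]) 0 (Or.inl rfl)]
      · by_cases hq : c = '"'
        · simp [List.foldl_cons, juntarStep, hb, hq, gScan, ih (acc ++ ['"']) 0 (Or.inl rfl)]
        · simp [List.foldl_cons, juntarStep, hb, hq, gScan, ih (acc ++ [c]) 1 (Or.inr rfl)]

-- PySem's fuel-based splitOn on a one-char separator is List.splitOnP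
theorem go_cons_eq (q c : Char) (fuel : Nat) (rest cur : List Char) (acc : List (List Char)) :
    PySem.Chars.splitOn.go [q] (fuel + 1) (c :: rest) cur acc
      = if List.isPrefixOf [q] (c :: rest)
          then PySem.Chars.splitOn.go [q] fuel (List.drop [q].length (c :: rest)) [] (cur.reverse :: acc)
          else PySem.Chars.splitOn.go [q] fuel rest (c :: cur) acc := rfl

theorem splitOn_go_eq (q : Char) : ∀ (fuel : Nat) (l cur : List Char) (acc : List (List Char)),
    l.length < fuel →
    PySem.Chars.splitOn.go [q] fuel l cur acc
      = acc.reverse ++ (List.splitOnP (· == q) l).modifyHead (cur.reverse ++ ·) := by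
  intro fuel
  induction fuel with
  | zero => intro l cur acc h; omega
  | succ fuel ih =>
    intro l cur acc h
    cases l with
    | nil =>
      rw [show PySem.Chars.splitOn.go [q] (fuel + 1) [] cur acc
            = (cur.reverse :: acc).reverse from rfl]
      simp [List.splitOnP_nil, List.modifyHead]
    | cons c rest =>
      rw [go_cons_eq]
      by_cases hq : q = c
      · subst hq
        rw [if_pos (by simp [List.isPrefixOf])]
        rw [ih (List.drop [q].length (q :: rest)) [] (cur.reverse :: acc)
          (by simp [List.length_cons] at h ⊢; omega)]
        rcases hr : List.splitOnP (· == q) rest with _ | ⟨s, r⟩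
        · exact absurd hr (List.splitOnP_ne_nil _ _)
        · simp [List.splitOnP_cons, hr, List.modifyHead]
      · rw [if_neg (by simp [List.isPrefixOf]; exact fun h => hq h)]
        rw [ih rest (c :: cur) acc (by simp at h ⊢; omega)]
        rcases hr : List.splitOnP (· == q) rest with _ | ⟨s, r⟩
        · exact absurd hr (List.splitOnP_ne_nil _ _)
        · have hcq : ¬ c = q := fun h => hq h.symm
          simp [List.splitOnP_cons, hr, List.modifyHead, hcq]

theorem splitOn_eq (l : List Char) (q : Char) :
    PySem.Chars.splitOn l [q] = List.splitOnP (· == q) l := by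
  rw [PySem.Chars.splitOn, splitOn_go_eq q (l.length + 1) l [] [] (Nat.lt_succ_self _)]
  rcases hr : List.splitOnP (· == q) l with _ | ⟨s, r⟩
  · exact absurd hr (List.splitOnP_ne_nil _ _)
  · simp [List.modifyHead]

-- B's enumerate+map is an alternating-filter pass
def altF : Int → List (List Char) → List (List Char)
  | _, [] => []
  | n, s :: r => juntarFilt n s :: altF (n + 1) r

theorem altF_cons (n : Int) (s : List Char) (r : List (List Char)) :
    altF n (s :: r) = juntarFilt n s :: altF (n + 1) r := by rfl

theorem enum_map_eq (segs : List (List Char)) : ∀ n : Int,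
    (PySem.List.enumerate segs n).map (fun p => juntarFilt p.1 p.2) = altF n segs := by
  induction segs with
  | nil => intro n; simp [PySem.List.enumerate, altF]
  | cons s r ih => intro n; simp [PySem.List.enumerate, altF, ih]

theorem join_head (sep y : List Char) (xs : List (List Char)) :
    PySem.Chars.join sep (y :: xs) = y ++ PySem.Chars.join sep ([] :: xs) := by
  cases xs with
  | nil => simp [PySem.Chars.join_singleton]
  | cons z r => simp [PySem.Chars.join_cons_cons]

theorem mod_flip (n : Int) : PySem.Int.mod n 2 = 0 ↔ ¬ PySem.Int.mod (n + 1) 2 = 0 := by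
  rw [PySem.Int.mod_eq_emod_of_pos (by norm_num), PySem.Int.mod_eq_emod_of_pos (by norm_num)]
  omega

-- joining the alternating filters of the quote-split of l is the scanner
theorem join_alt (l : List Char) : ∀ n : Int,
    PySem.Chars.join ['"'] (altF n (List.splitOnP (· == '"') l))
      = gScan (!(PySem.Int.mod n 2 = 0)) l := by
  induction l with
  | nil =>
    intro n
    simp [List.splitOnP_nil, altF, gScan, PySem.Chars.join_singleton, juntarFilt]
  | cons c t ih =>
    intro n
    by_cases hq : c = '"'
    · subst hq
      rw [List.splitOnP_cons]
      simp only [beq_self_eq_true, if_pos]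
      rcases hr : List.splitOnP (· == ('"' : Char)) t with _ | ⟨s, r⟩
      · exact absurd hr (List.splitOnP_ne_nil _ _)
      · have hjf : juntarFilt n [] = [] := by unfold juntarFilt; split <;> rfl
        rw [altF_cons, hjf, altF_cons, PySem.Chars.join_cons_cons]
        have := ih (n + 1)
        rw [hr, altF_cons] at this
        rw [List.nil_append, this]
        by_cases hn : PySem.Int.mod n 2 = 0
        · have h1 : ¬ PySem.Int.mod (n + 1) 2 = 0 := (mod_flip n).1 hn
          rw [decide_eq_false h1, decide_eq_true hn]
          simp [gScan]
        · have h1 : PySem.Int.mod (n + 1) 2 = 0 := by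
            rcases PySem.Int.mod_two_eq (n + 1) with h | h
            · exact h
            · exact absurd ((mod_flip n).2 (by omega)) hn
          rw [decide_eq_true h1, decide_eq_false hn]
          simp [gScan]
    · rw [List.splitOnP_cons]
      have : ((c == ('"' : Char)) = false) := by simpa using hq
      rw [this]
      simp only [Bool.false_eq_true, if_neg, not_false_iff]
      rcases hr : List.splitOnP (· == ('"' : Char)) t with _ | ⟨s, r⟩
      · exact absurd hr (List.splitOnP_ne_nil _ _)
      · have hrec := ih n
        rw [hr] at hrec
        rw [show (List.modifyHead (List.cons c) (s :: r)) = (c :: s) :: r from rfl]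
        rw [altF_cons]
        rw [altF_cons] at hrec
        by_cases hn : PySem.Int.mod n 2 = 0
        · -- outside quotes: drop '\n' '\t' '(' ')' ' '
          by_cases hb : c = '\n' ∨ c = '\t' ∨ c = '(' ∨ c = ')' ∨ c = ' '
          · have : juntarFilt n (c :: s) = juntarFilt n s := by
              unfold juntarFilt; rw [if_pos hn, if_pos hn]
              rcases hb with rfl | rfl | rfl | rfl | rfl <;> simp
            rw [this, hrec]
            have hpar : (!decide (PySem.Int.mod n 2 = 0)) = false := by
              rw [decide_eq_true hn]; rfl
            rw [hpar]
            rcases hb with rfl | rfl | rfl | rfl | rfl <;> simp [gScan, hq]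
          · push_neg at hb
            have hf : juntarFilt n (c :: s) = c :: juntarFilt n s := by
              unfold juntarFilt; rw [if_pos hn, if_pos hn]
              simp [hb.1, hb.2.1, hb.2.2.1, hb.2.2.2.1, hb.2.2.2.2]
            rw [hf, join_head, List.cons_append, ← join_head, hrec]
            have hpar : (!decide (PySem.Int.mod n 2 = 0)) = false := by
              rw [decide_eq_true hn]; rfl
            rw [hpar]
            simp [gScan, hb.1, hb.2.1, hb.2.2.1, hb.2.2.2.1, hb.2.2.2.2, hq]
        · -- inside quotes: only '\n' '\t' '(' ')' dropped
          by_cases hb : c = '\n' ∨ c = '\t' ∨ c = '(' ∨ c = ')'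
          · have hf : juntarFilt n (c :: s) = juntarFilt n s := by
              unfold juntarFilt; rw [if_neg hn, if_neg hn]
              rcases hb with rfl | rfl | rfl | rfl <;> simp
            rw [hf, hrec]
            have hpar : (!decide (PySem.Int.mod n 2 = 0)) = true := by
              rw [decide_eq_false hn]; rfl
            rw [hpar]
            rcases hb with rfl | rfl | rfl | rfl <;> simp [gScan]
          · push_neg at hb
            have hf : juntarFilt n (c :: s) = c :: juntarFilt n s := by
              unfold juntarFilt; rw [if_neg hn, if_neg hn]
              simp [hb.1, hb.2.1, hb.2.2.1, hb.2.2.2]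
            rw [hf, join_head, List.cons_append, ← join_head, hrec]
            have hpar : (!decide (PySem.Int.mod n 2 = 0)) = true := by
              rw [decide_eq_false hn]; rfl
            rw [hpar]
            simp [gScan, hb.1, hb.2.1, hb.2.2.1, hb.2.2.2, hq]

-- ===== VERDICT (by name: the statement is the Claim_ definition above) =====
theorem juntar_spec : Claim_equal_juntar := by
  intro cont _
  unfold Spec_juntar juntar juntar_alt
  rw [foldA_eq cont.toList [] 0 (Or.inl rfl), splitOn_eq, enum_map_eq, join_alt]
  simp
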